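-- pv_equiv track=rewrite | github.com/BernardoLab/MedEvalArena | r_analysis/analyze_misses.py | _split_topics_for_radar
-- ===== SOURCE A (Python) =====
-- def _normalize_topic_label(topic: str) -> str:
--     return " ".join(str(topic or "").split()).casefold()
--
-- def _is_surgical_specialty_topic(topic: str) -> bool:
--     norm = _normalize_topic_label(topic)
--     if "surgery" in norm:
--         return True
--     if norm in {"otolaryngology", "urology", "ophthalmology"}:
--         return True
--     # Include OB/Gyn in the surgical panel by request.
--     return ("obstetrics" in norm) or ("gynecology" in norm) or ("obgyn" in norm)
--
-- def _is_other_specialty_topic(topic: str) -> bool: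
--     norm = _normalize_topic_label(topic)
--     return norm in {
--         "anesthesiology",
--         "dermatology",
--         "emergency medicine",
--         "neurology",
--         "radiation oncology",
--         "psychiatry",
--     }
--
-- def _split_topics_for_radar(topics_all: list[str]) -> tuple[list[str], list[str], list[str]]:
--     topics_surgery = [t for t in topics_all if _is_surgical_specialty_topic(t)]
--     surgery_set = set(topics_surgery)
--
--     topics_other_specialties = [
--         t for t in topics_all if t not in surgery_set and _is_other_specialty_topic(t)
--     ]
--     other_specialty_set = set(topics_other_specialties)
--
--     topics_im_fm = [
--         t for t in topics_all if t not in surgery_set and t not in other_specialty_set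
--     ]
--     return topics_surgery, topics_im_fm, topics_other_specialties
-- ===== SOURCE B (Python) =====
-- def _normalize_topic_label(topic: str) -> str:
--     return " ".join(str(topic or "").split()).casefold()
--
-- def _is_surgical_specialty_topic(topic: str) -> bool:
--     norm = _normalize_topic_label(topic)
--     if "surgery" in norm:
--         return True
--     if norm in {"otolaryngology", "urology", "ophthalmology"}:
--         return True
--     return ("obstetrics" in norm) or ("gynecology" in norm) or ("obgyn" in norm)
--
-- def _is_other_specialty_topic(topic: str) -> bool:
--     norm = _normalize_topic_label(topic)
--     return norm in {
--         "anesthesiology",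
--         "dermatology",
--         "emergency medicine",
--         "neurology",
--         "radiation oncology",
--         "psychiatry",
--     }
--
-- def _split_topics_for_radar(topics_all: list[str]) -> tuple[list[str], list[str], list[str]]:
--     # Single pass: each topic is classified once; the predicates depend only on the
--     # topic's value, so membership in A's exclusion sets coincides with the predicate.
--     topics_surgery: list[str] = []
--     topics_im_fm: list[str] = []
--     topics_other_specialties: list[str] = []
--     for t in topics_all:
--         if _is_surgical_specialty_topic(t):
--             topics_surgery.append(t)
--         elif _is_other_specialty_topic(t):
--             topics_other_specialties.append(t)
--         else:
--             topics_im_fm.append(t)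
--     return topics_surgery, topics_im_fm, topics_other_specialties
-- ===== Notes on version B (the rewrite author's own statement) =====
-- stated objective: simpler
-- what changed: Replaces A's three filtering passes over topics_all (with two intermediate exclusion sets) by a single pass that classifies each topic once via if/elif/else into the three lists; valid because both predicates depend only on the topic's value, so set membership coincides with the predicate.
import Mathlib
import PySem

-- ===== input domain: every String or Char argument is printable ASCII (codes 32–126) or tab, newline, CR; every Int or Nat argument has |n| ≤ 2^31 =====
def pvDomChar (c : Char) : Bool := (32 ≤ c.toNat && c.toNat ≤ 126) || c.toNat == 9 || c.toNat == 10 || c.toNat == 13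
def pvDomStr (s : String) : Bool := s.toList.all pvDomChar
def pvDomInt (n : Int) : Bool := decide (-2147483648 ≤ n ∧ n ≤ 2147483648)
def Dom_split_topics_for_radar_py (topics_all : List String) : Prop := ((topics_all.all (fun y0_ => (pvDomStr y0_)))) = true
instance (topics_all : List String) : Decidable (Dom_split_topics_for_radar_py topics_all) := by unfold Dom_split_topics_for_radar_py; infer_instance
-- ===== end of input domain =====

-- B replaces A's three filtering passes (with two intermediate exclusion sets) by one
-- classification pass appending each topic to exactly one of three lists: simpler, one pass.

-- ===== PORT A =====
-- shared helpers (same module-level helper functions in both Pythons)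
-- " ".join(str(topic or "").split()).casefold() ; 'topic or ""' is the identity on strings
-- ("" or "" == ""), and .casefold() = .lower() exactly on the ASCII domain.
def normalizeTopicLabel (topic : String) : String :=
  PySem.Str.lower (PySem.Str.join " " (PySem.Str.split₀ topic))

def isSurgicalSpecialtyTopic (topic : String) : Bool :=
  let norm := normalizeTopicLabel topic
  if PySem.Str.isIn "surgery" norm then true
  else if norm == "otolaryngology" || norm == "urology" || norm == "ophthalmology" then true
  else PySem.Str.isIn "obstetrics" norm || PySem.Str.isIn "gynecology" norm
       || PySem.Str.isIn "obgyn" norm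

def isOtherSpecialtyTopic (topic : String) : Bool :=
  let norm := normalizeTopicLabel topic
  norm == "anesthesiology" || norm == "dermatology" || norm == "emergency medicine"
    || norm == "neurology" || norm == "radiation oncology" || norm == "psychiatry"

def split_topics_for_radar_py (topics_all : List String) : List String × List String × List String :=
  let topics_surgery := topics_all.filter (fun t => isSurgicalSpecialtyTopic t)
  let surgery_set : PySem.Set String := PySem.Set.ofList topics_surgery
  let topics_other_specialties := topics_all.filter
    (fun t => !(PySem.Set.contains surgery_set t) && isOtherSpecialtyTopic t)
  let other_specialty_set : PySem.Set String := PySem.Set.ofList topics_other_specialties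
  let topics_im_fm := topics_all.filter
    (fun t => !(PySem.Set.contains surgery_set t) && !(PySem.Set.contains other_specialty_set t))
  (topics_surgery, topics_im_fm, topics_other_specialties)

-- ===== PORT B =====
def split_topics_for_radar_py_alt (topics_all : List String) : List String × List String × List String :=
  topics_all.foldl
    (fun acc t =>
      if isSurgicalSpecialtyTopic t then (acc.1 ++ [t], acc.2.1, acc.2.2)
      else if isOtherSpecialtyTopic t then (acc.1, acc.2.1, acc.2.2 ++ [t])
      else (acc.1, acc.2.1 ++ [t], acc.2.2))
    ([], [], [])

-- ===== PRECONDITION & SPEC =====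
def Spec_split_topics_for_radar_py (topics_all : List String) (out : List String × List String × List String) : Prop := out = split_topics_for_radar_py_alt topics_all
instance (topics_all : List String) (out : List String × List String × List String) : Decidable (Spec_split_topics_for_radar_py topics_all out) := by unfold Spec_split_topics_for_radar_py; infer_instance

-- ===== CLAIM (what is proved, stated in full; the proofs are below) =====
def Claim_equal_split_topics_for_radar_py : Prop := ∀ (topics_all : List String), Dom_split_topics_for_radar_py topics_all → Spec_split_topics_for_radar_py topics_all (split_topics_for_radar_py topics_all)

-- ===== LEMMAS AND PROOFS =====

-- For an element of the list, membership in the set of the filtered list is just the predicate.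
theorem contains_ofList_filter (l : List String) (p : String → Bool) (t : String) (ht : t ∈ l) :
    PySem.Set.contains (PySem.Set.ofList (l.filter p)) t = p t := by
  rw [Bool.eq_iff_iff]
  simp [PySem.Set.mem_ofList, List.mem_filter, ht]

-- B's fold, with the accumulators generalized, produces the three filters.
theorem alt_fold_eq (l : List String) (s i o : List String) :
    l.foldl
      (fun acc t =>
        if isSurgicalSpecialtyTopic t then (acc.1 ++ [t], acc.2.1, acc.2.2)
        else if isOtherSpecialtyTopic t then (acc.1, acc.2.1, acc.2.2 ++ [t])
        else (acc.1, acc.2.1 ++ [t], acc.2.2))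
      (s, i, o)
    = (s ++ l.filter (fun t => isSurgicalSpecialtyTopic t),
       i ++ l.filter (fun t => !isSurgicalSpecialtyTopic t && !isOtherSpecialtyTopic t),
       o ++ l.filter (fun t => !isSurgicalSpecialtyTopic t && isOtherSpecialtyTopic t)) := by
  induction l generalizing s i o with
  | nil => simp
  | cons t rest ih =>
    by_cases hs : isSurgicalSpecialtyTopic t = true
    · simp [List.foldl_cons, hs, ih]
    · simp only [Bool.not_eq_true] at hs
      by_cases ho : isOtherSpecialtyTopic t = true
      · simp [List.foldl_cons, hs, ho, ih]
      · simp only [Bool.not_eq_true] at ho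
        simp [List.foldl_cons, hs, ho, ih]

-- ===== VERDICT (by name: the statement is the Claim_ definition above) =====
theorem split_topics_for_radar_py_spec : Claim_equal_split_topics_for_radar_py := by
  intro topics_all _
  unfold Spec_split_topics_for_radar_py split_topics_for_radar_py split_topics_for_radar_py_alt
  rw [alt_fold_eq]
  simp only [List.nil_append]
  -- second pass: the surgery-set test is the surgical predicate on elements of the list
  have h2 : topics_all.filter
      (fun t => !(PySem.Set.contains (PySem.Set.ofList (topics_all.filter (fun t => isSurgicalSpecialtyTopic t))) t)
        && isOtherSpecialtyTopic t)
      = topics_all.filter (fun t => !isSurgicalSpecialtyTopic t && isOtherSpecialtyTopic t) := by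
    apply List.filter_congr
    intro t ht
    rw [contains_ofList_filter _ _ _ ht]
  rw [h2]
  -- third pass: both set tests reduce to the predicates
  have h3 : topics_all.filter
      (fun t => !(PySem.Set.contains (PySem.Set.ofList (topics_all.filter (fun t => isSurgicalSpecialtyTopic t))) t)
        && !(PySem.Set.contains (PySem.Set.ofList (topics_all.filter
              (fun t => !isSurgicalSpecialtyTopic t && isOtherSpecialtyTopic t))) t))
      = topics_all.filter (fun t => !isSurgicalSpecialtyTopic t && !isOtherSpecialtyTopic t) := by
    apply List.filter_congr
    intro t ht
    rw [contains_ofList_filter _ _ _ ht, contains_ofList_filter _ _ _ ht]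
    cases hs : isSurgicalSpecialtyTopic t <;> cases ho : isOtherSpecialtyTopic t <;> simp
  rw [h3]
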